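-- pv_equiv track=rewrite | github.com/janvr1/Algorithms-CVUT | HW6/test.py | edge_types
-- ===== SOURCE A (Python) =====
-- def edge_types(edges, colors):
--     edgetypes = [tuple(sorted([colors[i], colors[j]])) for i, j in edges]
--     types = dict()
--     for x in edgetypes:
--         types[x] = []
--     for i, x in enumerate(edges):
--         types[edgetypes[i]].append(x)
--     return(types)
-- ===== SOURCE B (Python) =====
-- def edge_types(edges, colors):
--     def key(e):
--         a, b = colors[e[0]], colors[e[1]]
--         return (a, b) if a <= b else (b, a)
--     keys = []
--     for e in edges:
--         k = key(e)
--         if k not in keys: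
--             keys.append(k)
--     return {k: [e for e in edges if key(e) == k] for k in keys}
-- ===== Notes on version B (the rewrite author's own statement) =====
-- stated objective: alternative
-- what changed: Instead of A's dict built by three passes (key comprehension, empty-list init, enumerate/append), B collects the distinct sorted color-pairs in first-occurrence order and then, for each key, scans the edges with a filter comprehension (key-outer grouping, O(K*E), no per-edge dict appends); keys are computed by a branch (a,b)/(b,a) instead of sorted().
import Mathlib
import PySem

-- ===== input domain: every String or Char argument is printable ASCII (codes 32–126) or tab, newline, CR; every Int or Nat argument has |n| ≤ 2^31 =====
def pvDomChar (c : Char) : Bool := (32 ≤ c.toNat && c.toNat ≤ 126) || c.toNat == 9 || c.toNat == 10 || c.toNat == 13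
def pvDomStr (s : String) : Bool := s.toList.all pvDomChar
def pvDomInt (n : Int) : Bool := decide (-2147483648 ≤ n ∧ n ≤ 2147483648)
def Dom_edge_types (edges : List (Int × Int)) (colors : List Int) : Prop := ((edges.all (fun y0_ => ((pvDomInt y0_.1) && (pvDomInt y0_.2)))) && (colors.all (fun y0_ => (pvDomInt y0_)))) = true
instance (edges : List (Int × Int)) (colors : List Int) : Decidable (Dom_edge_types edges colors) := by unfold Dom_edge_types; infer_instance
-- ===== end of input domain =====

-- B groups key-outer: it collects the distinct sorted color-pairs (first-occurrence order) and filters the edge list once per key, instead of A's dict built by three passes; alternative algorithm (O(K*E)), not faster.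


-- ===== PORT A =====
-- A's key: tuple(sorted([colors[i], colors[j]]))
def pvKeyA (colors : List Int) (p : Int × Int) : Int × Int :=
  match PySem.List.sorted [PySem.List.pyGetD colors p.1 0, PySem.List.pyGetD colors p.2 0] (fun x => x) with
  | [u, v] => (u, v)
  | _ => (0, 0)

def edge_types (edges : List (Int × Int)) (colors : List Int) : List (Int × Int × List (Int × Int)) :=
  let edgetypes := edges.map (pvKeyA colors)
  let types0 : PySem.Dict (Int × Int) (List (Int × Int)) :=
    edgetypes.foldl (fun d x => d.insert x []) PySem.Dict.empty
  let types :=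
    (PySem.List.enumerate edges 0).foldl
      (fun d ix => d.modify (PySem.List.pyGetD edgetypes ix.1 (0, 0)) [] (· ++ [ix.2])) types0
  types.items.map (fun p => (p.1.1, p.1.2, p.2))

-- ===== PORT B =====
-- B's key: (a, b) if a <= b else (b, a)
def pvKeyB (colors : List Int) (e : Int × Int) : Int × Int :=
  let a := PySem.List.pyGetD colors e.1 0
  let b := PySem.List.pyGetD colors e.2 0
  if a ≤ b then (a, b) else (b, a)

def edge_types_alt (edges : List (Int × Int)) (colors : List Int) : List (Int × Int × List (Int × Int)) :=
  let keys : List (Int × Int) :=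
    edges.foldl (fun ks e =>
      let k := pvKeyB colors e
      if ks.contains k then ks else ks ++ [k]) []
  keys.map (fun k => (k.1, k.2, edges.filter (fun e => pvKeyB colors e == k)))

-- ===== PRECONDITION & SPEC =====
-- Pre_: A raises IndexError when some endpoint of an edge is out of range for colors (Python negative indices wrap)
def Pre_edge_types (edges : List (Int × Int)) (colors : List Int) : Prop :=
  ∀ p ∈ edges, PySem.Raise.InRange colors.length p.1 ∧ PySem.Raise.InRange colors.length p.2
instance (edges : List (Int × Int)) (colors : List Int) : Decidable (Pre_edge_types edges colors) := by unfold Pre_edge_types; infer_instance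
def pvWitness_edge_types : (List (Int × Int)) × List Int := ([(0, 1), (1, 0), (0, 0), (-1, 0)], [5, 3])

def Spec_edge_types (edges : List (Int × Int)) (colors : List Int) (out : List (Int × Int × List (Int × Int))) : Prop := out = edge_types_alt edges colors
instance (edges : List (Int × Int)) (colors : List Int) (out : List (Int × Int × List (Int × Int))) : Decidable (Spec_edge_types edges colors out) := by unfold Spec_edge_types; infer_instance

-- ===== CLAIM (what is proved, stated in full; the proofs are below) =====
def Claim_equal_edge_types : Prop := ∀ (edges : List (Int × Int)) (colors : List Int), Dom_edge_types edges colors → Pre_edge_types edges colors → Spec_edge_types edges colors (edge_types edges colors)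

-- ===== LEMMAS AND PROOFS =====

-- the two key computations agree: sorting a two-element list is the min/max branch
theorem pvKey_eq (colors : List Int) (e : Int × Int) : pvKeyA colors e = pvKeyB colors e := by
  unfold pvKeyA pvKeyB
  set a := PySem.List.pyGetD colors e.1 0
  set b := PySem.List.pyGetD colors e.2 0
  by_cases h : a ≤ b
  · have : PySem.List.sorted [a, b] (fun x => x) = [a, b] :=
      PySem.List.sorted_id_eq_of_perm_of_pairwise _ _ (List.Perm.refl _) (by simp [h])
    simp [this, h]
  · have hba : b ≤ a := le_of_not_ge h
    have : PySem.List.sorted [a, b] (fun x => x) = [b, a] :=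
      PySem.List.sorted_id_eq_of_perm_of_pairwise _ _ (List.Perm.swap a b []) (by simp [hba])
    simp [this, h]

-- A's second loop, folded over enumerate with pyGetD back into edgetypes, is the fold over zip
theorem pv_enum_fold (ets : List (Int × Int)) (xs : List (Int × Int))
    (d : PySem.Dict (Int × Int) (List (Int × Int))) (h : ets.length = xs.length) :
    (PySem.List.enumerate xs 0).foldl
      (fun d ix => d.modify (PySem.List.pyGetD ets ix.1 (0, 0)) [] (· ++ [ix.2])) d
    = (ets.zip xs).foldl (fun d p => d.modify p.1 [] (· ++ [p.2])) d := by
  rw [PySem.List.enumerate_eq_map_pyRange xs ((0,0) : Int × Int), List.foldl_map]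
  simp only [PySem.List.len_eq]
  have hz : (ets.zip xs).length = xs.length := by simp [List.length_zip, h]
  have hcong : (PySem.List.pyRange 0 (xs.length : Int) 1).foldl
      (fun d j => d.modify (PySem.List.pyGetD ets j (0, 0)) [] (· ++ [PySem.List.pyGetD xs j (0,0)])) d
    = (PySem.List.pyRange 0 ((ets.zip xs).length : Int) 1).foldl
      (fun d j => (fun d p => PySem.Dict.modify d p.1 [] (· ++ [p.2])) d
        (PySem.List.pyGetD (ets.zip xs) j ((0,0),(0,0)))) d := by
    rw [hz]
    apply PySem.List.foldl_congr_mem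
    intro acc j hj
    have hj' := (PySem.List.mem_pyRange_one).1 hj
    have h0 : (0:Int) ≤ j := by omega
    rw [PySem.List.pyGetD_eq_getElem _ _ h0 (by omega),
        PySem.List.pyGetD_eq_getElem _ _ h0 (by omega),
        PySem.List.pyGetD_eq_getElem _ _ h0 (by omega)]
    simp [List.getElem_zip]
  rw [hcong]
  exact PySem.List.foldl_pyRange_zero_pyGetD' (ets.zip xs) ((0,0),(0,0))
    (fun d p => PySem.Dict.modify d p.1 [] (· ++ [p.2])) d

-- the init loop leaves every value []
theorem pv_init_getD (ets : List (Int × Int)) (d : PySem.Dict (Int × Int) (List (Int × Int)))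
    (hd : ∀ k, d.getD k [] = []) (k : Int × Int) :
    (ets.foldl (fun d x => d.insert x ([] : List (Int × Int))) d).getD k [] = [] := by
  induction ets generalizing d with
  | nil => exact hd k
  | cons a l ih =>
    simp only [List.foldl_cons]
    exact ih _ (fun k' => by rw [PySem.Dict.getD_insert]; split <;> simp [hd])

-- zipping a map of a list with the list itself
theorem pv_zip_map (colors : List Int) (l : List (Int × Int)) :
    (l.map (pvKeyA colors)).zip l = l.map (fun x => (pvKeyA colors x, x)) := by
  induction l with
  | nil => rfl
  | cons a t ih => simp [ih]

-- updating a set with elements it already has changes nothing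
theorem pv_update_self (ets : List (Int × Int)) :
    PySem.Set.update (PySem.Set.ofList ets) ets = PySem.Set.ofList ets := by
  rw [PySem.Set.update_eq_append_filter]
  have h : (PySem.Set.ofList ets).filter
      (fun y => !(PySem.Set.contains (PySem.Set.ofList ets) y)) = [] := by
    apply List.filter_eq_nil_iff.2
    intro y hy
    have hy' : y ∈ ets := by simpa using (PySem.Set.mem_ofList _ _).1 hy
    simp [hy']
  rw [h, List.append_nil]

-- B's dedup loop builds exactly set(map(key, edges)) in first-occurrence order
theorem pv_keys_fold (colors : List Int) (edges : List (Int × Int)) :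
    edges.foldl (fun ks e =>
      let k := pvKeyB colors e
      if ks.contains k then ks else ks ++ [k]) []
    = PySem.Set.ofList (edges.map (pvKeyB colors)) := by
  rw [PySem.Set.ofList_eq_foldl, List.foldl_map]
  rfl

-- A's accumulated dict value at key k is the filter of edges by key
theorem pv_A_getD (colors : List Int) (edges : List (Int × Int)) (k : Int × Int) :
    (((edges.map (pvKeyA colors)).zip edges).foldl (fun d p => d.modify p.1 [] (· ++ [p.2]))
      ((edges.map (pvKeyA colors)).foldl (fun d x => d.insert x []) PySem.Dict.empty)).getD k []
    = edges.filter (fun e => pvKeyA colors e == k) := by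
  rw [PySem.Dict.getD_foldl_modify_append,
      pv_init_getD _ _ (fun k' => PySem.Dict.getD_empty _ _)]
  simp only [List.nil_append]
  rw [pv_zip_map, List.filter_map, List.map_map]
  simp [Function.comp_def]

-- ===== VERDICT (by name: the statement is the Claim_ definition above) =====
theorem edge_types_spec : Claim_equal_edge_types := by
  intro edges colors _ _
  unfold Spec_edge_types
  simp only [edge_types, edge_types_alt]
  rw [pv_keys_fold]
  have hfun : pvKeyA colors = pvKeyB colors := funext (pvKey_eq colors)
  rw [← hfun]
  set ets := edges.map (pvKeyA colors) with hets
  rw [pv_enum_fold ets edges _ (by simp [hets])]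
  set dA := (ets.zip edges).foldl (fun d p => d.modify p.1 [] (· ++ [p.2]))
      (ets.foldl (fun d x => d.insert x []) PySem.Dict.empty) with hdA
  have hndA : dA.keys.Nodup := by
    rw [hdA]
    exact PySem.Dict.nodup_keys_foldl_modify_key _ Prod.fst [] _ _
      (PySem.Dict.nodup_keys_foldl_insert _ _ _ (by simp))
  rw [PySem.Dict.items_eq_map_keys dA hndA ([] : List (Int × Int))]
  have hkA : dA.keys = PySem.Set.ofList ets := by
    rw [hdA, PySem.Dict.keys_foldl_modify_key, PySem.Dict.keys_foldl_insert_key]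
    rw [List.map_fst_zip (by simp [hets])]
    simp only [PySem.Dict.keys_empty, List.map_id', PySem.Set.update_nil_left]
    exact pv_update_self ets
  rw [hkA, List.map_map]
  apply List.map_congr_left
  intro k _
  simp only [Function.comp_def]
  rw [hdA, pv_A_getD]
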